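-- pv_equiv track=rewrite | github.com/pawik077/AdventOfCode | 2025/07/solve.py | part2
-- ===== SOURCE A (Python) =====
-- def part2(data):
--     data = [list(x) for x in data]
--     start = (0, data[0].index("S"))
--     data[1][start[1]] = 1
--     for y in range(1, len(data) - 1):
--         for x in range(len(data[0])):
--             # each path carries the count of different ways to reach it
--             if isinstance(data[y][x], int):
--                 if data[y + 1][x] == ".":
--                     data[y + 1][x] = data[y][x]
--                 # if paths merge, sum their counts
--                 elif isinstance(data[y + 1][x], int):
--                     data[y + 1][x] += data[y][x]
--                 # if they split, distribute the count to both paths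
--                 elif data[y + 1][x] == "^":
--                     data[y + 1][x + 1] = (
--                         data[y + 1][x + 1] + data[y][x]
--                         if isinstance(data[y + 1][x + 1], int)
--                         else data[y][x]
--                     )
--                     data[y + 1][x - 1] = (
--                         data[y + 1][x - 1] + data[y][x]
--                         if isinstance(data[y + 1][x - 1], int)
--                         else data[y][x]
--                     )
--     return sum([x for x in data[-1] if isinstance(x, int)])
-- ===== SOURCE B (Python) =====
-- def part2(data):
--     w = len(data[0])
--     s = data[0].index("S")
--     f = [1 if j == s else 0 for j in range(w)]
--     for row in data[2:]:
--         f = [(f[j] if row[j] == "." else 0)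
--              + (f[j - 1] if j > 0 and row[j - 1] == "^" else 0)
--              + (f[j + 1] if j + 1 < w and row[j + 1] == "^" else 0)
--              for j in range(w)]
--     return sum(f)
-- ===== Notes on version B (the rewrite author's own statement) =====
-- stated objective: alternative
-- what changed: A scatters counts by mutating the character grid in place (cells become ints, splitters push to x-1/x+1); B keeps the grid read-only and pulls each next frontier row by gathering the three possible contributions per column into a separate integer array, summing the final frontier.
-- outside the precondition, e.g. on part2(['S.', '..', '^.']): A returns 2, B returns 1; on part2(['S.', '..', '.']): A returns 1, B raises IndexError
import Mathlib
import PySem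

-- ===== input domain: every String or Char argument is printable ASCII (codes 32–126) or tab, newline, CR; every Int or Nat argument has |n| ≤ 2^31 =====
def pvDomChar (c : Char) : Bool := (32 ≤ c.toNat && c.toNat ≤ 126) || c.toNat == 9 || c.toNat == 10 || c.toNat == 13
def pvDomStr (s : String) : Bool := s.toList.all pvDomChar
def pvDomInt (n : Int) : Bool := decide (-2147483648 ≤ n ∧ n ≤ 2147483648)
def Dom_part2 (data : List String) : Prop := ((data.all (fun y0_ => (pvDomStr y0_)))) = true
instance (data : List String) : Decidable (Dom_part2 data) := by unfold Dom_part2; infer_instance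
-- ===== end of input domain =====

-- B replaces A's in-place scatter mutation of the grid by a read-only pull DP over a
-- separate frontier row of counts; equivalence is proved on grids (Pre_) where A's
-- index arithmetic stays in range and splitters are isolated ('^' flanked by '.').

-- ===== PORT A =====
-- A stores either the original character or an int count in each grid cell.
inductive Cell
  | ch  : Char → Cell
  | num : Int → Cell
deriving DecidableEq, Repr

-- Python `row[x] = v` (negative index counts from the end; out of range would raise → grid left unchanged, outside Pre_)
def rowPySet (row : List Cell) (x : Int) (v : Cell) : List Cell :=
  let i := if x < 0 then x + row.length else x
  if 0 ≤ i ∧ i < (row.length : Int) then row.set i.toNat v else row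

-- Python `data[y][x] = v` for the nonnegative y A uses (y is 1 or y+1 ≥ 2 in A)
def gridSet (g : List (List Cell)) (y x : Int) (v : Cell) : List (List Cell) :=
  if 0 ≤ y then
    ((PySem.List.pyGet? g y).map (fun row => g.set y.toNat (rowPySet row x v))).getD g
  else g

-- Python `data[y][x]` (default only reached outside Pre_)
def gridGet (g : List (List Cell)) (y x : Int) : Cell :=
  match PySem.List.pyGet? g y with
  | some row => (PySem.List.pyGet? row x).getD (Cell.ch ' ')
  | none => Cell.ch ' '

-- Python's `t + c if isinstance(t, int) else c` (the splitter's merge-or-overwrite expression)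
def addCount (t : Cell) (c : Int) : Cell :=
  match t with
  | Cell.num e => Cell.num (e + c)
  | _ => Cell.num c

def cellVal? (c : Cell) : Option Int :=
  match c with
  | Cell.num v => some v
  | _ => none

-- the body of A's inner loop, step for step
def part2body (g : List (List Cell)) (y x : Int) : List (List Cell) :=
  match gridGet g y x with
  | Cell.num c =>
    match gridGet g (y+1) x with
    | Cell.ch d =>
      if d = '.' then gridSet g (y+1) x (Cell.num c)
      else if d = '^' then
        let g1 := gridSet g (y+1) (x+1) (addCount (gridGet g (y+1) (x+1)) c)
        gridSet g1 (y+1) (x-1) (addCount (gridGet g1 (y+1) (x-1)) c)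
      else g
    | Cell.num d => gridSet g (y+1) x (Cell.num (d + c))
  | Cell.ch _ => g

def part2 (data : List String) : Int :=
  let g0 : List (List Cell) := data.map (fun x => x.toList.map Cell.ch)
  let start : Int × Int :=
    (0, (((PySem.List.index? ((PySem.List.pyGet? g0 0).getD []) (Cell.ch 'S')).getD 0 : Nat) : Int))
  let g1 := gridSet g0 1 start.2 (Cell.num 1)
  let gf := (PySem.List.pyRange 1 ((g1.length : Int) - 1) 1).foldl
      (fun g y =>
        (PySem.List.pyRange 0 ((((PySem.List.pyGet? g 0).getD []).length : Int)) 1).foldl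
          (fun g x => part2body g y x) g) g1
  (((PySem.List.pyGet? gf (-1)).getD []).filterMap cellVal?).sum

-- ===== PORT B =====
-- one pull step: next frontier row gathered from the previous one
def gatherRow (w : Nat) (f : List Int) (r : List Char) : List Int :=
  (List.range w).map (fun j =>
    (if r.getD j ' ' = '.' then f.getD j 0 else 0)
    + (if 0 < j ∧ r.getD (j-1) ' ' = '^' then f.getD (j-1) 0 else 0)
    + (if j + 1 < w ∧ r.getD (j+1) ' ' = '^' then f.getD (j+1) 0 else 0))

def part2_alt (data : List String) : Int :=
  let r0 := (data.headD "").toList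
  let w := r0.length
  let s := (PySem.List.index? r0 'S').getD 0
  let f0 := (List.range w).map (fun j => if j = s then (1:Int) else 0)
  (((data.drop 2).map String.toList).foldl (fun f r => gatherRow w f r) f0).sum

-- ===== PRECONDITION & SPEC =====
-- a row is OK (within the first w columns, the ones A's loop visits) when every '^'
-- there is strictly inside those columns and flanked by '.' on both sides
def rowOK (w : Nat) (r : List Char) : Bool :=
  (List.range w).all (fun j =>
    r.getD j ' ' ≠ '^' ||
    (decide (0 < j) && decide (j + 1 < w)
      && (r.getD (j-1) ' ' == '.') && (r.getD (j+1) ' ' == '.')))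

-- Pre_ excludes: grids without an 'S' in row 0 or with fewer than 2 rows (A raises there);
-- grids (beyond two rows) with a later row shorter than row 0 (A usually raises IndexError
-- there, and where it happens to return, our B raises); and grids with a '^' in the first
-- w columns of rows 2.. touching column 0 / w-1 or not flanked by '.' (there A may raise
-- IndexError at the right edge, wrap to the last column via index -1, or overwrite a
-- neighbouring '^' mid-scan — artefacts of A's in-place scatter).
def Pre_part2 (data : List String) : Prop :=
  2 ≤ data.length ∧
  'S' ∈ (data.headD "").toList ∧
  (data.length = 2 →
    (PySem.List.index? (data.headD "").toList 'S').getD 0 < (data.getD 1 "").toList.length) ∧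
  (3 ≤ data.length →
    (∀ s ∈ data.drop 1, (data.headD "").toList.length ≤ s.toList.length) ∧
    (∀ s ∈ data.drop 2, rowOK (data.headD "").toList.length s.toList = true))

instance (data : List String) : Decidable (Pre_part2 data) := by
  unfold Pre_part2; infer_instance

def pvWitness_part2 : List String := [".S.", "...", ".^.", "..."]

def Spec_part2 (data : List String) (out : Int) : Prop := out = part2_alt data
instance (data : List String) (out : Int) : Decidable (Spec_part2 data out) := by
  unfold Spec_part2; infer_instance

-- ===== CLAIM (what is proved, stated in full; the proofs are below) =====
def Claim_equal_part2 : Prop := ∀ (data : List String), Dom_part2 data → Pre_part2 data → Spec_part2 data (part2 data)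

-- ===== LEMMAS AND PROOFS =====

-- merged view of a row: positive counts shown as numbers, the rest as the original chars
def mergeRow (f : List Int) (r : List Char) : List Cell :=
  List.zipWith (fun v c => if 0 < v then Cell.num v else Cell.ch c) f r

-- the three possible contributions into a cell of the next frontier
def aT (f : List Int) (r : List Char) (j : Nat) : Int :=
  if r.getD j ' ' = '.' then f.getD j 0 else 0
def bT (f : List Int) (r : List Char) (j : Nat) : Int :=
  if 0 < j ∧ r.getD (j-1) ' ' = '^' then f.getD (j-1) 0 else 0
def cT (w : Nat) (f : List Int) (r : List Char) (j : Nat) : Int :=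
  if j + 1 < w ∧ r.getD (j+1) ' ' = '^' then f.getD (j+1) 0 else 0

-- partial gather after A's inner loop has processed columns 0..x-1
def contrib (w : Nat) (f : List Int) (r : List Char) (x j : Nat) : Int :=
  (if j < x then aT f r j else 0)
  + (if j - 1 < x then bT f r j else 0)
  + (if j + 1 < x then cT w f r j else 0)

def pgRow (w : Nat) (f : List Int) (r : List Char) (x : Nat) : List Int :=
  (List.range w).map (contrib w f r x)

lemma getD_nonneg (f : List Int) (hpos : ∀ v ∈ f, 0 ≤ v) (j : Nat) : 0 ≤ f.getD j 0 := by
  by_cases h : j < f.length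
  · rw [List.getD_eq_getElem f 0 h]; exact hpos _ (List.getElem_mem h)
  · rw [List.getD_eq_default f 0 (Nat.le_of_not_lt h)]

lemma aT_nonneg (f : List Int) (r : List Char) (hpos : ∀ v ∈ f, 0 ≤ v) (j : Nat) :
    0 ≤ aT f r j := by
  unfold aT; split_ifs with h
  · exact getD_nonneg f hpos j
  · exact le_refl 0

lemma bT_nonneg (f : List Int) (r : List Char) (hpos : ∀ v ∈ f, 0 ≤ v) (j : Nat) :
    0 ≤ bT f r j := by
  unfold bT; split_ifs with h
  · exact getD_nonneg f hpos (j-1)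
  · exact le_refl 0

lemma cT_nonneg (w : Nat) (f : List Int) (r : List Char) (hpos : ∀ v ∈ f, 0 ≤ v) (j : Nat) :
    0 ≤ cT w f r j := by
  unfold cT; split_ifs with h
  · exact getD_nonneg f hpos (j+1)
  · exact le_refl 0

lemma contrib_nonneg (w : Nat) (f : List Int) (r : List Char) (hpos : ∀ v ∈ f, 0 ≤ v)
    (x j : Nat) : 0 ≤ contrib w f r x j := by
  unfold contrib
  have ha := aT_nonneg f r hpos j
  have hb := bT_nonneg f r hpos j
  have hc := cT_nonneg w f r hpos j
  split_ifs <;> omega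

lemma ite_lt_succ (g : Int) (k x : Nat) :
    (if k < x + 1 then g else 0) = (if k < x then g else 0) + (if k = x then g else 0) := by
  split_ifs <;> omega

lemma contrib_succ (w : Nat) (f : List Int) (r : List Char) (x j : Nat) :
    contrib w f r (x+1) j = contrib w f r x j
      + (if j = x then aT f r j else 0)
      + (if j - 1 = x then bT f r j else 0)
      + (if j + 1 = x then cT w f r j else 0) := by
  unfold contrib
  rw [ite_lt_succ (aT f r j) j x, ite_lt_succ (bT f r j) (j-1) x,
    ite_lt_succ (cT w f r j) (j+1) x]
  ring

lemma length_mergeRow (f : List Int) (r : List Char) :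
    (mergeRow f r).length = min f.length r.length := List.length_zipWith ..

lemma getElem_mergeRow (f : List Int) (r : List Char) (j : Nat)
    (h : j < (mergeRow f r).length) :
    (mergeRow f r)[j] =
      (if 0 < f[j]'(by rw [length_mergeRow] at h; omega) then
        Cell.num (f[j]'(by rw [length_mergeRow] at h; omega))
      else Cell.ch (r[j]'(by rw [length_mergeRow] at h; omega))) := by
  unfold mergeRow
  rw [List.getElem_zipWith]

lemma length_pgRow (w : Nat) (f : List Int) (r : List Char) (x : Nat) :
    (pgRow w f r x).length = w := by simp [pgRow]

lemma getElem_pgRow (w : Nat) (f : List Int) (r : List Char) (x j : Nat) (h : j < w) :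
    (pgRow w f r x)[j]'(by rw [length_pgRow]; exact h) = contrib w f r x j := by
  simp [pgRow]

-- rowOK spelled out
lemma rowOK_spec (w : Nat) (r : List Char) (h : rowOK w r = true) (j : Nat) (hj : j < w)
    (hc : r.getD j ' ' = '^') :
    0 < j ∧ j + 1 < w ∧ r.getD (j-1) ' ' = '.' ∧ r.getD (j+1) ' ' = '.' := by
  unfold rowOK at h
  rw [List.all_eq_true] at h
  have := h j (List.mem_range.mpr hj)
  simp only [hc, Bool.or_eq_true, Bool.and_eq_true, decide_eq_true_eq, beq_iff_eq,
    ne_eq, not_true_eq_false, decide_false, Bool.false_eq_true, false_or] at this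
  tauto

lemma gatherRow_eq (w : Nat) (f : List Int) (r : List Char) :
    gatherRow w f r = (List.range w).map (fun j => aT f r j + bT f r j + cT w f r j) := rfl

lemma pgRow_full (w : Nat) (f : List Int) (r : List Char) :
    pgRow w f r w = gatherRow w f r := by
  rw [gatherRow_eq]
  apply List.map_congr_left
  intro j hj
  rw [List.mem_range] at hj
  unfold contrib
  have h1 : j < w := hj
  have h2 : j - 1 < w := by omega
  rw [if_pos h1, if_pos h2]
  by_cases h3 : j + 1 < w
  · rw [if_pos h3]
  · rw [if_neg h3]
    have : cT w f r j = 0 := by unfold cT; rw [if_neg]; intro hand; exact h3 hand.1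
    rw [this]

lemma merge_pg0 (w : Nat) (f : List Int) (r : List Char) (hw : w ≤ r.length) :
    mergeRow (pgRow w f r 0) r = (r.take w).map Cell.ch := by
  apply List.ext_getElem
  · rw [length_mergeRow, length_pgRow]; simp
  · intro j h1 h2
    have hj : j < w := by rw [length_mergeRow, length_pgRow] at h1; omega
    rw [getElem_mergeRow, getElem_pgRow w f r 0 j hj]
    have hz : contrib w f r 0 j = 0 := by unfold contrib; simp
    rw [hz]
    rw [if_neg (by omega : ¬ (0:Int) < 0)]
    rw [List.getElem_map, List.getElem_take]

lemma map_ch_split (w : Nat) (f : List Int) (r : List Char) (hw : w ≤ r.length) :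
    r.map Cell.ch = mergeRow (pgRow w f r 0) r ++ (r.drop w).map Cell.ch := by
  rw [merge_pg0 w f r hw, ← List.map_append, List.take_append_drop]

-- list surgery lemmas
lemma set_append_len {α : Type} (pre : List α) (b : α) (suf : List α) (v : α) :
    (pre ++ b :: suf).set pre.length v = pre ++ v :: suf := by
  induction pre with
  | nil => rfl
  | cons a l ih => simpa using ih

lemma set_append_left {α : Type} (l1 l2 : List α) (j : Nat) (v : α) (h : j < l1.length) :
    (l1 ++ l2).set j v = l1.set j v ++ l2 := by
  induction l1 generalizing j with
  | nil => simp at h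
  | cons a t ih =>
    cases j with
    | zero => rfl
    | succ j =>
      simp only [List.cons_append, List.set_cons_succ]
      rw [ih j (by simpa using h)]

lemma rowPySet_nat (row : List Cell) (x : Nat) (v : Cell) (h : x < row.length) :
    rowPySet row (x : Int) v = row.set x v := by
  unfold rowPySet
  have h0 : ¬ ((x : Int) < 0) := by omega
  rw [if_neg h0]
  have : (0 : Int) ≤ (x : Int) ∧ (x : Int) < (row.length : Int) := by omega
  rw [if_pos this]
  simp

lemma pyGet?_mid1 {α : Type} (pre : List α) (a : α) (rest : List α) :
    PySem.List.pyGet? (pre ++ a :: rest) (pre.length : Int) = some a := by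
  simpa using PySem.List.pyGet?_append_length (pre := pre) (y := a) (ys := rest)

lemma pyGet?_mid2 {α : Type} (pre : List α) (a b : α) (rest : List α) :
    PySem.List.pyGet? (pre ++ a :: b :: rest) ((pre.length : Int) + 1) = some b := by
  have h : pre ++ a :: b :: rest = (pre ++ [a]) ++ b :: rest := by simp
  have h2 : ((pre.length : Int) + 1) = (((pre ++ [a]).length : Nat) : Int) := by
    simp
  rw [h, h2]
  exact pyGet?_mid1 (pre ++ [a]) b rest

lemma gridGet_mid1 (pre : List (List Cell)) (a : List Cell) (rest : List (List Cell))
    (x : Nat) (hx : x < a.length) :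
    gridGet (pre ++ a :: rest) (pre.length : Int) (x : Int) = a[x] := by
  unfold gridGet
  rw [pyGet?_mid1]
  simp [PySem.List.pyGet?_natCast, List.getElem?_eq_getElem hx]

lemma gridGet_mid2 (pre : List (List Cell)) (a b : List Cell) (rest : List (List Cell))
    (x : Nat) (hx : x < b.length) :
    gridGet (pre ++ a :: b :: rest) ((pre.length : Int) + 1) (x : Int) = b[x] := by
  unfold gridGet
  rw [pyGet?_mid2]
  simp [PySem.List.pyGet?_natCast, List.getElem?_eq_getElem hx]

lemma gridSet_mid2 (pre : List (List Cell)) (a b : List Cell) (rest : List (List Cell))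
    (x : Int) (v : Cell) :
    gridSet (pre ++ a :: b :: rest) ((pre.length : Int) + 1) x v
      = pre ++ a :: rowPySet b x v :: rest := by
  unfold gridSet
  rw [if_pos (by omega : (0:Int) ≤ (pre.length : Int) + 1)]
  rw [pyGet?_mid2]
  simp only [Option.map_some, Option.getD_some]
  have h1 : ((pre.length : Int) + 1).toNat = (pre ++ [a]).length := by
    simp [List.length_append]
  rw [h1]
  have h : pre ++ a :: b :: rest = (pre ++ [a]) ++ b :: rest := by simp
  rw [h, set_append_len]
  simp

lemma length_gatherRow (w : Nat) (f : List Int) (r : List Char) :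
    (gatherRow w f r).length = w := by simp [gatherRow]

lemma gatherRow_nonneg (w : Nat) (f : List Int) (r : List Char) (hpos : ∀ v ∈ f, 0 ≤ v) :
    ∀ v ∈ gatherRow w f r, 0 ≤ v := by
  intro v hv
  rw [gatherRow_eq] at hv
  obtain ⟨j, _, rfl⟩ := List.mem_map.mp hv
  have ha := aT_nonneg f r hpos j
  have hb := bT_nonneg f r hpos j
  have hc := cT_nonneg w f r hpos j
  omega

lemma contrib_self (w : Nat) (f : List Int) (r : List Char) (x : Nat) :
    contrib w f r x x = bT f r x := by
  unfold contrib
  rw [if_neg (Nat.lt_irrefl x), if_neg (by omega : ¬ x + 1 < x)]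
  rcases Nat.eq_zero_or_pos x with h | h
  · subst h
    simp [bT]
  · rw [if_pos (by omega : x - 1 < x)]; ring

lemma contrib_right_zero (w x : Nat) (f : List Int) (r : List Char) :
    contrib w f r x (x+1) = 0 := by
  unfold contrib
  rw [if_neg (by omega : ¬ x + 1 < x), if_neg (by omega : ¬ x + 1 - 1 < x),
    if_neg (by omega : ¬ x + 1 + 1 < x)]
  ring

lemma bT_self_zero_of_dot (f : List Int) (r : List Char) (x : Nat)
    (hL : r.getD (x-1) ' ' = '.') : bT f r x = 0 := by
  unfold bT
  rw [if_neg]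
  intro hg
  rw [hL] at hg
  exact absurd hg.2 (by decide)

lemma pg_succ_noop (w x : Nat) (f : List Int) (r : List Char)
    (hA0 : aT f r x = 0) (hBC : f.getD x 0 = 0 ∨ r.getD x ' ' ≠ '^') :
    pgRow w f r (x+1) = pgRow w f r x := by
  unfold pgRow
  apply List.map_congr_left
  intro j hj
  rw [contrib_succ]
  have e1 : (if j = x then aT f r j else 0) = 0 := by
    split_ifs with h
    · rw [h]; exact hA0
    · rfl
  have e2 : (if j - 1 = x then bT f r j else 0) = 0 := by
    split_ifs with h
    · unfold bT
      split_ifs with hg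
      · rw [h] at hg ⊢
        rcases hBC with h0 | hne
        · exact h0
        · exact absurd hg.2 hne
      · rfl
    · rfl
  have e3 : (if j + 1 = x then cT w f r j else 0) = 0 := by
    split_ifs with h
    · unfold cT
      split_ifs with hg
      · rw [h] at hg ⊢
        rcases hBC with h0 | hne
        · exact h0
        · exact absurd hg.2 hne
      · rfl
    · rfl
  rw [e1, e2, e3]
  ring

lemma set_dot (w x : Nat) (hx : x < w) (f : List Int) (r : List Char)
    (hr : w ≤ r.length) (hpos : ∀ v ∈ f, 0 ≤ v)
    (hdot : r.getD x ' ' = '.') (hfx : 0 < f.getD x 0) :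
    (mergeRow (pgRow w f r x) r).set x (Cell.num (bT f r x + f.getD x 0))
      = mergeRow (pgRow w f r (x+1)) r := by
  apply List.ext_getElem
  · simp [length_mergeRow, length_pgRow]
  · intro j h1 h2
    have hj : j < w := by
      have := h2
      rw [length_mergeRow, length_pgRow] at this
      omega
    rw [List.getElem_set, getElem_mergeRow, getElem_mergeRow,
      getElem_pgRow w f r x j hj, getElem_pgRow w f r (x+1) j hj]
    by_cases hxj : x = j
    · subst hxj
      rw [if_pos rfl]
      have hcx : contrib w f r (x+1) x = bT f r x + f.getD x 0 := by
        rw [contrib_succ, contrib_self]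
        have e1 : (if x = x then aT f r x else 0) = aT f r x := if_pos rfl
        have e2 : (if x - 1 = x then bT f r x else 0) = 0 := by
          split_ifs with h
          · have hx0 : x = 0 := by omega
            subst hx0
            unfold bT
            simp
          · rfl
        have e3 : (if x + 1 = x then cT w f r x else 0) = 0 := by
          rw [if_neg (by omega : ¬ x + 1 = x)]
        rw [e1, e2, e3]
        unfold aT
        rw [if_pos hdot]
        ring
      rw [hcx]
      rw [if_pos (by have := bT_nonneg f r hpos x; omega)]
    · rw [if_neg hxj]
      have ej : contrib w f r (x+1) j = contrib w f r x j := by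
        rw [contrib_succ]
        have e1 : (if j = x then aT f r j else 0) = 0 := by
          rw [if_neg (fun hh => hxj hh.symm)]
        have e2 : (if j - 1 = x then bT f r j else 0) = 0 := by
          split_ifs with h
          · unfold bT
            split_ifs with hg
            · rw [h] at hg
              rw [hdot] at hg
              exact absurd hg.2 (by decide)
            · rfl
          · rfl
        have e3 : (if j + 1 = x then cT w f r j else 0) = 0 := by
          split_ifs with h
          · unfold cT
            split_ifs with hg
            · rw [h] at hg
              rw [hdot] at hg
              exact absurd hg.2 (by decide)
            · rfl
          · rfl
        rw [e1, e2, e3]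
        ring
      rw [ej]

lemma set_car (w x : Nat) (f : List Int) (r : List Char)
    (hr : w ≤ r.length) (hpos : ∀ v ∈ f, 0 ≤ v)
    (hcar : r.getD x ' ' = '^') (hfx : 0 < f.getD x 0)
    (h0 : 0 < x) (hxw : x + 1 < w)
    (hL : r.getD (x-1) ' ' = '.') (hR : r.getD (x+1) ' ' = '.') :
    ((mergeRow (pgRow w f r x) r).set (x+1) (Cell.num (f.getD x 0))).set (x-1)
        (Cell.num (contrib w f r x (x-1) + f.getD x 0))
      = mergeRow (pgRow w f r (x+1)) r := by
  apply List.ext_getElem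
  · simp [length_mergeRow, length_pgRow]
  · intro j h1 h2
    have hj : j < w := by
      have := h2
      rw [length_mergeRow, length_pgRow] at this
      omega
    rw [List.getElem_set, List.getElem_set, getElem_mergeRow, getElem_mergeRow,
      getElem_pgRow w f r x j hj, getElem_pgRow w f r (x+1) j hj]
    by_cases hj1 : x - 1 = j
    · rw [if_pos hj1]
      have hcj : contrib w f r (x+1) j = contrib w f r x (x-1) + f.getD x 0 := by
        subst hj1
        rw [contrib_succ]
        have e1 : (if x - 1 = x then aT f r (x-1) else 0) = 0 := by
          rw [if_neg (by omega : ¬ x - 1 = x)]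
        have e2 : (if x - 1 - 1 = x then bT f r (x-1) else 0) = 0 := by
          rw [if_neg (by omega : ¬ x - 1 - 1 = x)]
        have e3 : (if x - 1 + 1 = x then cT w f r (x-1) else 0) = cT w f r (x-1) := by
          rw [if_pos (by omega : x - 1 + 1 = x)]
        have e4 : cT w f r (x-1) = f.getD x 0 := by
          unfold cT
          rw [show x - 1 + 1 = x by omega]
          rw [if_pos ⟨by omega, hcar⟩]
        rw [e1, e2, e3, e4]
        ring
      rw [hcj]
      rw [if_pos (by have := contrib_nonneg w f r hpos x (x-1); omega)]
    · rw [if_neg hj1]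
      by_cases hj2 : x + 1 = j
      · rw [if_pos hj2]
        have hcj : contrib w f r (x+1) j = f.getD x 0 := by
          subst hj2
          rw [contrib_succ, contrib_right_zero]
          have e1 : (if x + 1 = x then aT f r (x+1) else 0) = 0 := by
            rw [if_neg (by omega : ¬ x + 1 = x)]
          have e2 : (if x + 1 - 1 = x then bT f r (x+1) else 0) = bT f r (x+1) := by
            rw [if_pos (by omega : x + 1 - 1 = x)]
          have e3 : (if x + 1 + 1 = x then cT w f r (x+1) else 0) = 0 := by
            rw [if_neg (by omega : ¬ x + 1 + 1 = x)]
          have e4 : bT f r (x+1) = f.getD x 0 := by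
            unfold bT
            rw [show x + 1 - 1 = x by omega]
            rw [if_pos ⟨by omega, hcar⟩]
          rw [e1, e2, e3, e4]
          ring
        rw [hcj, if_pos hfx]
      · rw [if_neg hj2]
        have ej : contrib w f r (x+1) j = contrib w f r x j := by
          rw [contrib_succ]
          have e1 : (if j = x then aT f r j else 0) = 0 := by
            split_ifs with h
            · subst h
              unfold aT
              rw [hcar]
              rw [if_neg (by decide)]
            · rfl
          have e2 : (if j - 1 = x then bT f r j else 0) = 0 := by
            rw [if_neg (by omega : ¬ j - 1 = x)]
          have e3 : (if j + 1 = x then cT w f r j else 0) = 0 := by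
            rw [if_neg (by omega : ¬ j + 1 = x)]
          rw [e1, e2, e3]
          ring
        rw [ej]

-- THE STEP: one execution of A's inner-loop body advances the partial gather by one column
lemma part2_step (w x : Nat) (hx : x < w) (pre suf : List (List Cell))
    (tA tB : List Cell) (f : List Int) (ry r : List Char)
    (hf : f.length = w) (hry : w ≤ ry.length) (hr : w ≤ r.length)
    (hok : rowOK w r = true) (hpos : ∀ v ∈ f, 0 ≤ v) :
    part2body (pre ++ (mergeRow f ry ++ tA) :: (mergeRow (pgRow w f r x) r ++ tB) :: suf)
        (pre.length : Int) (x : Int)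
      = pre ++ (mergeRow f ry ++ tA) :: (mergeRow (pgRow w f r (x+1)) r ++ tB) :: suf := by
  have hlenA : (mergeRow f ry).length = w := by
    rw [length_mergeRow, hf]; omega
  have hlenM : (mergeRow (pgRow w f r x) r).length = w := by
    rw [length_mergeRow, length_pgRow]; omega
  have hxA : x < (mergeRow f ry).length := by omega
  have hxM : x < (mergeRow (pgRow w f r x) r).length := by omega
  have hread1 : gridGet
      (pre ++ (mergeRow f ry ++ tA) :: (mergeRow (pgRow w f r x) r ++ tB) :: suf)
      (pre.length : Int) (x : Int) = (mergeRow f ry)[x]'hxA := by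
    rw [gridGet_mid1 pre _ _ x (by rw [List.length_append]; omega)]
    exact List.getElem_append_left hxA
  have hAx : (mergeRow f ry)[x]'hxA
      = if 0 < f.getD x 0 then Cell.num (f.getD x 0) else Cell.ch (ry.getD x ' ') := by
    rw [getElem_mergeRow]
    rw [← List.getD_eq_getElem f 0 (by omega), ← List.getD_eq_getElem ry ' ' (by omega)]
  have hread2 : gridGet
      (pre ++ (mergeRow f ry ++ tA) :: (mergeRow (pgRow w f r x) r ++ tB) :: suf)
      ((pre.length : Int) + 1) (x : Int) = (mergeRow (pgRow w f r x) r)[x]'hxM := by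
    rw [gridGet_mid2 pre _ _ _ x (by rw [List.length_append]; omega)]
    exact List.getElem_append_left hxM
  have hMx : (mergeRow (pgRow w f r x) r)[x]'hxM
      = if 0 < bT f r x then Cell.num (bT f r x) else Cell.ch (r.getD x ' ') := by
    rw [getElem_mergeRow, getElem_pgRow w f r x x hx, contrib_self]
    rw [← List.getD_eq_getElem r ' ' (by omega)]
  have hsetM : ∀ (x' : Nat) (v : Cell), x' < w →
      rowPySet (mergeRow (pgRow w f r x) r ++ tB) (x' : Int) v
        = (mergeRow (pgRow w f r x) r).set x' v ++ tB := by
    intro x' v hx'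
    rw [rowPySet_nat _ x' _ (by rw [List.length_append]; omega)]
    exact set_append_left _ _ x' v (by omega)
  by_cases hfx : 0 < f.getD x 0
  · -- the cell above carries a count
    have hA : gridGet
        (pre ++ (mergeRow f ry ++ tA) :: (mergeRow (pgRow w f r x) r ++ tB) :: suf)
        (pre.length : Int) (x : Int) = Cell.num (f.getD x 0) := by
      rw [hread1, hAx, if_pos hfx]
    by_cases hdot : r.getD x ' ' = '.'
    · -- '.' below: the count descends (merging if the cell already holds one)
      by_cases hb : 0 < bT f r x
      · have hM : gridGet
            (pre ++ (mergeRow f ry ++ tA) :: (mergeRow (pgRow w f r x) r ++ tB) :: suf)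
            ((pre.length : Int) + 1) (x : Int) = Cell.num (bT f r x) := by
          rw [hread2, hMx, if_pos hb]
        simp only [part2body, hA, hM]
        rw [gridSet_mid2, hsetM x _ hx]
        rw [set_dot w x hx f r hr hpos hdot hfx]
      · have hbz : bT f r x = 0 := le_antisymm (not_lt.mp hb) (bT_nonneg f r hpos x)
        have hM : gridGet
            (pre ++ (mergeRow f ry ++ tA) :: (mergeRow (pgRow w f r x) r ++ tB) :: suf)
            ((pre.length : Int) + 1) (x : Int) = Cell.ch '.' := by
          rw [hread2, hMx, if_neg hb, hdot]
        simp only [part2body, hA, hM, if_true]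
        rw [gridSet_mid2, hsetM x _ hx]
        rw [show Cell.num (f.getD x 0) = Cell.num (bT f r x + f.getD x 0) by
          rw [hbz, zero_add]]
        rw [set_dot w x hx f r hr hpos hdot hfx]
    · by_cases hcar : r.getD x ' ' = '^'
      · -- '^' below: the count splits to both sides
        obtain ⟨h0, hxw, hL, hR⟩ := rowOK_spec w r hok x hx hcar
        have hbz : bT f r x = 0 := bT_self_zero_of_dot f r x hL
        have hM : gridGet
            (pre ++ (mergeRow f ry ++ tA) :: (mergeRow (pgRow w f r x) r ++ tB) :: suf)
            ((pre.length : Int) + 1) (x : Int) = Cell.ch '^' := by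
          rw [hread2, hMx, hbz, if_neg (by omega), hcar]
        simp only [part2body, hA, hM, if_true]
        rw [if_neg (by decide : ¬ ('^' : Char) = '.')]
        have hc1 : ((x : Int) + 1) = (((x + 1 : Nat)) : Int) := by push_cast; ring
        have hc2 : ((x : Int) - 1) = (((x - 1 : Nat)) : Int) := by omega
        rw [hc1, hc2]
        have hM1read : gridGet
            (pre ++ (mergeRow f ry ++ tA) :: (mergeRow (pgRow w f r x) r ++ tB) :: suf)
            ((pre.length : Int) + 1) ((x + 1 : Nat) : Int) = Cell.ch '.' := by
          rw [gridGet_mid2 pre _ _ _ (x+1) (by rw [List.length_append]; omega)]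
          rw [List.getElem_append_left (by omega : x + 1 < (mergeRow (pgRow w f r x) r).length)]
          rw [getElem_mergeRow, getElem_pgRow w f r x (x+1) (by omega), contrib_right_zero]
          rw [if_neg (by omega)]
          rw [← List.getD_eq_getElem r ' ' (by omega), hR]
        rw [hM1read, show addCount (Cell.ch '.') (f.getD x 0) = Cell.num (f.getD x 0) from rfl]
        rw [gridSet_mid2, hsetM (x+1) _ (by omega)]
        have hM2read : gridGet (pre ++ (mergeRow f ry ++ tA) ::
              ((mergeRow (pgRow w f r x) r).set (x+1) (Cell.num (f.getD x 0)) ++ tB) :: suf)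
            ((pre.length : Int) + 1) ((x - 1 : Nat) : Int)
            = if 0 < contrib w f r x (x-1) then Cell.num (contrib w f r x (x-1))
              else Cell.ch '.' := by
          rw [gridGet_mid2 pre _ _ _ (x-1)
            (by rw [List.length_append, List.length_set]; omega)]
          rw [List.getElem_append_left
            (by rw [List.length_set]; omega :
              x - 1 < ((mergeRow (pgRow w f r x) r).set (x+1) (Cell.num (f.getD x 0))).length)]
          rw [List.getElem_set, if_neg (by omega : ¬ x + 1 = x - 1)]
          rw [getElem_mergeRow, getElem_pgRow w f r x (x-1) (by omega)]
          rw [← List.getD_eq_getElem r ' ' (by omega), hL]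
        rw [hM2read]
        have hsetM1 : ∀ (v : Cell),
            rowPySet ((mergeRow (pgRow w f r x) r).set (x+1) (Cell.num (f.getD x 0)) ++ tB)
              ((x - 1 : Nat) : Int) v
            = ((mergeRow (pgRow w f r x) r).set (x+1) (Cell.num (f.getD x 0))).set (x-1) v
              ++ tB := by
          intro v
          rw [rowPySet_nat _ (x-1) _ (by rw [List.length_append, List.length_set]; omega)]
          exact set_append_left _ _ (x-1) v (by rw [List.length_set]; omega)
        by_cases hP : 0 < contrib w f r x (x-1)
        · rw [if_pos hP,
            show addCount (Cell.num (contrib w f r x (x-1))) (f.getD x 0)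
              = Cell.num (contrib w f r x (x-1) + f.getD x 0) from rfl]
          rw [gridSet_mid2, hsetM1 _]
          rw [set_car w x f r hr hpos hcar hfx h0 hxw hL hR]
        · have hPz : contrib w f r x (x-1) = 0 :=
            le_antisymm (not_lt.mp hP) (contrib_nonneg w f r hpos x (x-1))
          rw [if_neg hP,
            show addCount (Cell.ch '.') (f.getD x 0) = Cell.num (f.getD x 0) from rfl]
          rw [gridSet_mid2, hsetM1 _]
          have hsc := set_car w x f r hr hpos hcar hfx h0 hxw hL hR
          rw [hPz, zero_add] at hsc
          rw [hsc]
      · -- a wall or other character below: the count dies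
        have hbz : bT f r x = 0 := by
          unfold bT
          rw [if_neg]
          intro hg
          obtain ⟨-, -, -, hnext⟩ := rowOK_spec w r hok (x-1) (by omega) hg.2
          rw [show x - 1 + 1 = x by omega] at hnext
          exact hdot hnext
        have hM : gridGet
            (pre ++ (mergeRow f ry ++ tA) :: (mergeRow (pgRow w f r x) r ++ tB) :: suf)
            ((pre.length : Int) + 1) (x : Int) = Cell.ch (r.getD x ' ') := by
          rw [hread2, hMx, hbz, if_neg (by omega)]
        simp only [part2body, hA, hM]
        rw [if_neg hdot, if_neg hcar]
        rw [pg_succ_noop w x f r (by unfold aT; rw [if_neg hdot]) (Or.inr hcar)]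
  · -- no count above this column: nothing happens
    have hA : gridGet
        (pre ++ (mergeRow f ry ++ tA) :: (mergeRow (pgRow w f r x) r ++ tB) :: suf)
        (pre.length : Int) (x : Int) = Cell.ch (ry.getD x ' ') := by
      rw [hread1, hAx, if_neg hfx]
    have hfx0 : f.getD x 0 = 0 := le_antisymm (not_lt.mp hfx) (getD_nonneg f hpos x)
    simp only [part2body, hA]
    rw [pg_succ_noop w x f r (by unfold aT; split_ifs <;> omega) (Or.inl hfx0)]

lemma inner_aux (w : Nat) (pre suf : List (List Cell)) (tA tB : List Cell)
    (f : List Int) (ry r : List Char)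
    (hf : f.length = w) (hry : w ≤ ry.length) (hr : w ≤ r.length)
    (hok : rowOK w r = true) (hpos : ∀ v ∈ f, 0 ≤ v) :
    ∀ x, x ≤ w →
    ((List.range x).map (fun k : Nat => (k : Int))).foldl
        (fun g j => part2body g (pre.length : Int) j)
        (pre ++ (mergeRow f ry ++ tA) :: (mergeRow (pgRow w f r 0) r ++ tB) :: suf)
      = pre ++ (mergeRow f ry ++ tA) :: (mergeRow (pgRow w f r x) r ++ tB) :: suf := by
  intro x
  induction x with
  | zero => intro _; simp
  | succ n ih =>
    intro h
    rw [List.range_succ, List.map_append, List.foldl_append, ih (by omega)]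
    simp only [List.map_cons, List.map_nil, List.foldl_cons, List.foldl_nil]
    exact part2_step w n (by omega) pre suf tA tB f ry r hf hry hr hok hpos

lemma inner_fold (w : Nat) (pre suf : List (List Cell)) (tA : List Cell)
    (f : List Int) (ry r : List Char)
    (hf : f.length = w) (hry : w ≤ ry.length) (hr : w ≤ r.length)
    (hok : rowOK w r = true) (hpos : ∀ v ∈ f, 0 ≤ v) :
    (PySem.List.pyRange 0 (w : Int) 1).foldl
        (fun g x => part2body g (pre.length : Int) x)
        (pre ++ (mergeRow f ry ++ tA) :: (r.map Cell.ch) :: suf)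
      = pre ++ (mergeRow f ry ++ tA) ::
          (mergeRow (gatherRow w f r) r ++ (r.drop w).map Cell.ch) :: suf := by
  rw [map_ch_split w f r hr, ← pgRow_full]
  have hrange : PySem.List.pyRange 0 (w : Int) 1
      = (List.range w).map (fun k : Nat => (k : Int)) := by
    rw [PySem.List.pyRange_one]
    have h0 : (((w : Int) - 0)).toNat = w := by omega
    rw [h0]
    apply List.map_congr_left
    intro k _
    omega
  rw [hrange]
  exact inner_aux w pre suf tA ((r.drop w).map Cell.ch) f ry r hf hry hr hok hpos w (le_refl w)

lemma headD_append_cons {α : Type} (pre : List α) (a : α) (X Y : List α) (d : α) :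
    (pre ++ a :: X).headD d = (pre ++ a :: Y).headD d := by
  cases pre <;> rfl

lemma pyGet?_zero_getD {α : Type} (l : List α) (d : α) :
    (PySem.List.pyGet? l 0).getD d = l.headD d := by
  rw [PySem.List.pyGet?_zero]
  cases l <;> rfl

-- THE OUTER LOOP: A's row sweep tracks B's frontier fold
lemma outer_fold (w : Nat) :
    ∀ (rs : List (List Char)) (pre : List (List Cell)) (f : List Int) (ry : List Char),
    f.length = w → w ≤ ry.length →
    (∀ r ∈ rs, w ≤ r.length) → (∀ r ∈ rs, rowOK w r = true) → (∀ v ∈ f, 0 ≤ v) →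
    ((pre ++ (mergeRow f ry ++ (ry.drop w).map Cell.ch) ::
        rs.map (fun r => r.map Cell.ch)).headD []).length = w →
    ∃ pre',
      (PySem.List.pyRange (pre.length : Int) ((pre.length : Int) + (rs.length : Int)) 1).foldl
        (fun g y =>
          (PySem.List.pyRange 0 ((((PySem.List.pyGet? g 0).getD []).length : Int)) 1).foldl
            (fun g x => part2body g y x) g)
        (pre ++ (mergeRow f ry ++ (ry.drop w).map Cell.ch) ::
          rs.map (fun r => r.map Cell.ch))
      = pre' ++ [mergeRow (rs.foldl (fun f r => gatherRow w f r) f) (rs.getLastD ry)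
          ++ ((rs.getLastD ry).drop w).map Cell.ch] := by
  intro rs
  induction rs with
  | nil =>
    intro pre f ry hf hry _ _ _ _
    refine ⟨pre, ?_⟩
    rw [show (pre.length : Int) + ((List.length [] : Nat) : Int) = (pre.length : Int) by simp]
    rw [PySem.List.pyRange_one_eq_nil (le_refl _)]
    simp [List.getLastD]
  | cons r rs' ih =>
    intro pre f ry hf hry hlens hoks hpos hw0
    simp only [List.map_cons] at hw0
    have hcons : (r :: rs').map (fun r => r.map Cell.ch)
        = (r.map Cell.ch) :: rs'.map (fun r => r.map Cell.ch) := rfl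
    rw [hcons]
    have hlt : (pre.length : Int) < (pre.length : Int) + (((r :: rs').length : Nat) : Int) := by
      push_cast [List.length_cons]; omega
    rw [PySem.List.pyRange_one_cons hlt, List.foldl_cons]
    -- width of the current grid is w
    have hwidth : ((PySem.List.pyGet? (pre ++ (mergeRow f ry ++ (ry.drop w).map Cell.ch) ::
        (r.map Cell.ch) :: rs'.map (fun r => r.map Cell.ch)) 0).getD []).length = w := by
      rw [pyGet?_zero_getD]
      exact hw0
    rw [hwidth]
    rw [inner_fold w pre (rs'.map (fun r => r.map Cell.ch)) ((ry.drop w).map Cell.ch) f ry r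
      hf hry (hlens r (by simp)) (hoks r (by simp)) hpos]
    have hassoc : pre ++ (mergeRow f ry ++ (ry.drop w).map Cell.ch) ::
          (mergeRow (gatherRow w f r) r ++ (r.drop w).map Cell.ch) ::
          rs'.map (fun r => r.map Cell.ch)
        = (pre ++ [mergeRow f ry ++ (ry.drop w).map Cell.ch]) ++
          (mergeRow (gatherRow w f r) r ++ (r.drop w).map Cell.ch) ::
          rs'.map (fun r => r.map Cell.ch) := by simp
    have hbounds : PySem.List.pyRange ((pre.length : Int) + 1)
          ((pre.length : Int) + (((r :: rs').length : Nat) : Int)) 1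
        = PySem.List.pyRange
          (((pre ++ [mergeRow f ry ++ (ry.drop w).map Cell.ch]).length : Nat) : Int)
          ((((pre ++ [mergeRow f ry ++ (ry.drop w).map Cell.ch]).length : Nat) : Int)
            + ((rs'.length : Nat) : Int)) 1 := by
      congr 1 <;> simp <;> omega
    rw [hassoc, hbounds]
    have hnew0 : (((pre ++ [mergeRow f ry ++ (ry.drop w).map Cell.ch]) ++
        (mergeRow (gatherRow w f r) r ++ (r.drop w).map Cell.ch) ::
        rs'.map (fun r => r.map Cell.ch)).headD []).length = w := by
      have heq : (pre ++ [mergeRow f ry ++ (ry.drop w).map Cell.ch]) ++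
            (mergeRow (gatherRow w f r) r ++ (r.drop w).map Cell.ch) ::
            rs'.map (fun r => r.map Cell.ch)
          = pre ++ (mergeRow f ry ++ (ry.drop w).map Cell.ch) ::
            ((mergeRow (gatherRow w f r) r ++ (r.drop w).map Cell.ch) ::
            rs'.map (fun r => r.map Cell.ch)) := by simp
      rw [heq]
      rw [headD_append_cons pre (mergeRow f ry ++ (ry.drop w).map Cell.ch) _
        ((r.map Cell.ch) :: rs'.map (fun r => r.map Cell.ch)) ([] : List Cell)]
      exact hw0
    obtain ⟨pre', hpre'⟩ := ih (pre ++ [mergeRow f ry ++ (ry.drop w).map Cell.ch])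
      (gatherRow w f r) r
      (length_gatherRow w f r) (hlens r (by simp))
      (fun q hq => hlens q (by simp [hq])) (fun q hq => hoks q (by simp [hq]))
      (gatherRow_nonneg w f r hpos) hnew0
    refine ⟨pre', ?_⟩
    rw [hpre']
    rw [List.foldl_cons, List.getLastD_cons]

lemma sum_filterMap_mergeRow (f : List Int) (r : List Char)
    (hlen : f.length ≤ r.length) (hpos : ∀ v ∈ f, 0 ≤ v) :
    ((mergeRow f r).filterMap cellVal?).sum = f.sum := by
  induction f generalizing r with
  | nil => simp [mergeRow]
  | cons v fs ih =>
    cases r with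
    | nil => simp at hlen
    | cons c rs =>
      have hnum : ∀ u : Int, cellVal? (Cell.num u) = some u := fun _ => rfl
      have hch : cellVal? (Cell.ch c) = none := rfl
      have hihs := ih rs (by simpa using hlen) (fun q hq => hpos q (by simp [hq]))
      by_cases hv : 0 < v
      · have hstep : mergeRow (v :: fs) (c :: rs) = Cell.num v :: mergeRow fs rs := by
          simp [mergeRow, hv]
        rw [hstep, List.filterMap_cons, hnum, List.sum_cons, hihs]
        simp
      · have hv0 : v = 0 := le_antisymm (not_lt.mp hv) (hpos v (by simp))
        have hstep : mergeRow (v :: fs) (c :: rs) = Cell.ch c :: mergeRow fs rs := by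
          simp [mergeRow, hv]
        rw [hstep, List.filterMap_cons, hch, List.sum_cons, hihs, hv0]
        ring

lemma getLastD_prop {α : Type} (P : α → Prop) :
    ∀ (l : List α) (d : α), P d → (∀ x ∈ l, P x) → P (l.getLastD d) := by
  intro l
  induction l with
  | nil => intro d hd _; exact hd
  | cons a t ih =>
    intro d _ hl
    rw [List.getLastD_cons]
    exact ih a (hl a (by simp)) (fun x hx => hl x (by simp [hx]))

lemma foldl_gather_length (w : Nat) :
    ∀ (rs : List (List Char)) (f : List Int), f.length = w →
    (rs.foldl (fun f r => gatherRow w f r) f).length = w := by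
  intro rs
  induction rs with
  | nil => intro f hf; exact hf
  | cons r rs' ih => intro f _; exact ih (gatherRow w f r) (length_gatherRow w f r)

lemma foldl_gather_nonneg (w : Nat) :
    ∀ (rs : List (List Char)) (f : List Int), (∀ v ∈ f, 0 ≤ v) →
    ∀ v ∈ rs.foldl (fun f r => gatherRow w f r) f, 0 ≤ v := by
  intro rs
  induction rs with
  | nil => intro f hf; exact hf
  | cons r rs' ih => intro f hf; exact ih (gatherRow w f r) (gatherRow_nonneg w f r hf)

lemma index?_map_ch (l : List Char) (c : Char) :
    PySem.List.index? (l.map Cell.ch) (Cell.ch c) = PySem.List.index? l c := by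
  induction l with
  | nil => rfl
  | cons a t ih =>
    by_cases h : a = c
    · subst h
      rw [List.map_cons, PySem.List.index?_cons_self, PySem.List.index?_cons_self]
    · rw [List.map_cons, PySem.List.index?_cons_of_ne _ (by simp [h]),
        PySem.List.index?_cons_of_ne _ h, ih]

lemma pyGet?_one {α : Type} (a b : α) (l : List α) :
    PySem.List.pyGet? (a :: b :: l) 1 = some b := by
  have h : (1 : Int) = ((1 : Nat) : Int) := rfl
  rw [h, PySem.List.pyGet?_natCast]
  rfl

lemma gridSet_one (a b : List Cell) (l : List (List Cell)) (x : Int) (v : Cell) :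
    gridSet (a :: b :: l) 1 x v = a :: rowPySet b x v :: l := by
  unfold gridSet
  rw [if_pos (by omega : (0:Int) ≤ 1), pyGet?_one]
  rfl

lemma f0_nonneg (w k : Nat) :
    ∀ v ∈ (List.range w).map (fun j => if j = k then (1:Int) else 0), 0 ≤ v := by
  intro v hv
  obtain ⟨j, _, rfl⟩ := List.mem_map.mp hv
  split_ifs <;> omega

lemma filterMap_map_ch (l : List Char) :
    (l.map Cell.ch).filterMap cellVal? = [] := by
  induction l with
  | nil => rfl
  | cons c t ih =>
    rw [List.map_cons, List.filterMap_cons, show cellVal? (Cell.ch c) = none from rfl, ih]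

lemma seed_merge (r1 : List Char) (k w : Nat) (hw : w ≤ r1.length) (hk : k < w) :
    (r1.map Cell.ch).set k (Cell.num 1)
      = mergeRow ((List.range w).map (fun j => if j = k then (1:Int) else 0)) r1
        ++ (r1.drop w).map Cell.ch := by
  have hsplit : r1.map Cell.ch = (r1.take w).map Cell.ch ++ (r1.drop w).map Cell.ch := by
    rw [← List.map_append, List.take_append_drop]
  rw [hsplit, set_append_left _ _ k _ (by simp; omega)]
  congr 1
  apply List.ext_getElem
  · rw [List.length_set, length_mergeRow]; simp
  · intro j h1 h2
    have hj : j < w := by simp at h1; omega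
    rw [List.getElem_set, getElem_mergeRow]
    have hval : ((List.range w).map (fun j => if j = k then (1:Int) else 0))[j]'(by
        simp; omega) = if j = k then (1:Int) else 0 := by simp
    simp only [hval, List.getElem_map, List.getElem_take]
    by_cases h : j = k
    · subst h; simp
    · have hkj : ¬ k = j := fun hh => h hh.symm
      simp [h, hkj]

lemma sum_onehot (w k : Nat) :
    (((List.range w).map (fun j => if j = k then (1:Int) else 0)).sum)
      = if k < w then (1:Int) else 0 := by
  induction w with
  | zero => simp
  | succ n ih =>
    rw [List.range_succ, List.map_append, List.sum_append, ih]
    simp only [List.map_cons, List.map_nil, List.sum_cons, List.sum_nil]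
    by_cases h : n = k
    · subst h; rw [if_neg (by omega), if_pos (by omega), if_pos (by omega)]; ring
    · rw [if_neg h]
      by_cases h2 : k < n
      · rw [if_pos h2, if_pos (by omega)]; ring
      · rw [if_neg h2, if_neg (by omega)]; ring

lemma filterMap_set_one (r : List Char) (k : Nat) (hk : k < r.length) :
    ((r.map Cell.ch).set k (Cell.num 1)).filterMap cellVal? = [1] := by
  induction r generalizing k with
  | nil => simp at hk
  | cons c t ih =>
    cases k with
    | zero =>
      rw [List.map_cons, List.set_cons_zero, List.filterMap_cons,
        show cellVal? (Cell.num 1) = some 1 from rfl, filterMap_map_ch]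
    | succ k =>
      rw [List.map_cons, List.set_cons_succ, List.filterMap_cons,
        show cellVal? (Cell.ch c) = none from rfl, ih k (by simpa using hk)]

lemma part2_alt_two (d0 d1 : String) (k : Nat)
    (hidx : PySem.List.index? d0.toList 'S' = some k) (hk : k < d0.toList.length) :
    part2_alt [d0, d1] = 1 := by
  unfold part2_alt
  simp only [List.headD_cons, hidx, Option.getD_some]
  have h := sum_onehot d0.toList.length k
  rw [if_pos hk] at h
  exact h

lemma part2_two (d0 d1 : String) (k : Nat)
    (hidx : PySem.List.index? d0.toList 'S' = some k) (hk1 : k < d1.toList.length) :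
    part2 [d0, d1] = 1 := by
  unfold part2
  simp only [List.map_cons, List.map_nil, PySem.List.pyGet?_zero_cons, Option.getD_some]
  rw [index?_map_ch, hidx]
  simp only [Option.getD_some]
  rw [gridSet_one]
  rw [rowPySet_nat _ k _ (by simpa using hk1)]
  rw [show (([List.map Cell.ch d0.toList,
      (List.map Cell.ch d1.toList).set k (Cell.num 1)] : List (List Cell)).length : Int) - 1
    = 1 by simp]
  rw [PySem.List.pyRange_one_eq_nil (le_refl 1), List.foldl_nil]
  rw [PySem.List.pyGet?_neg_one]
  rw [show ([List.map Cell.ch d0.toList, (List.map Cell.ch d1.toList).set k (Cell.num 1)]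
      : List (List Cell))
    = [List.map Cell.ch d0.toList] ++ [(List.map Cell.ch d1.toList).set k (Cell.num 1)]
    from rfl]
  rw [List.getLast?_concat, Option.getD_some]
  rw [filterMap_set_one d1.toList k hk1]
  rfl

lemma part2_alt_eval (d0 d1 : String) (drest : List String) (k : Nat)
    (hidx : PySem.List.index? d0.toList 'S' = some k) :
    part2_alt (d0 :: d1 :: drest)
      = ((drest.map String.toList).foldl (fun f r => gatherRow d0.toList.length f r)
          ((List.range d0.toList.length).map (fun j => if j = k then (1:Int) else 0))).sum := by
  unfold part2_alt
  simp only [List.headD_cons, hidx, Option.getD_some]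
  rfl

lemma part2_eval (d0 d1 : String) (drest : List String) (k w : Nat)
    (hidx : PySem.List.index? d0.toList 'S' = some k)
    (hw : d0.toList.length = w) (hw1 : w ≤ d1.toList.length) (hkw : k < w)
    (hlens : ∀ s ∈ drest, w ≤ s.toList.length)
    (hoks : ∀ s ∈ drest, rowOK w s.toList = true) :
    part2 (d0 :: d1 :: drest)
      = ((drest.map String.toList).foldl (fun f r => gatherRow w f r)
          ((List.range w).map (fun j => if j = k then (1:Int) else 0))).sum := by
  unfold part2
  simp only [List.map_cons, PySem.List.pyGet?_zero_cons, Option.getD_some]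
  rw [index?_map_ch, hidx]
  simp only [Option.getD_some]
  rw [gridSet_one]
  rw [rowPySet_nat (d1.toList.map Cell.ch) k (Cell.num 1) (by rw [List.length_map]; omega)]
  rw [seed_merge d1.toList k w hw1 hkw]
  have hshape : (d0.toList.map Cell.ch) ::
        (mergeRow ((List.range w).map (fun j => if j = k then (1:Int) else 0)) d1.toList
          ++ (d1.toList.drop w).map Cell.ch) ::
        drest.map (fun x => x.toList.map Cell.ch)
      = [d0.toList.map Cell.ch] ++
        (mergeRow ((List.range w).map (fun j => if j = k then (1:Int) else 0)) d1.toList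
          ++ (d1.toList.drop w).map Cell.ch) ::
        (drest.map String.toList).map (fun r => r.map Cell.ch) := by
    simp [List.map_map]
  rw [hshape]
  obtain ⟨pre', hfold⟩ := outer_fold w (drest.map String.toList) [d0.toList.map Cell.ch]
    ((List.range w).map (fun j => if j = k then (1:Int) else 0)) d1.toList
    (by simp) hw1
    (by intro r hr; obtain ⟨s, hs, rfl⟩ := List.mem_map.mp hr; exact hlens s hs)
    (by intro r hr; obtain ⟨s, hs, rfl⟩ := List.mem_map.mp hr; exact hoks s hs)
    (f0_nonneg w k)
    (by simp [hw])
  have h1 : (([d0.toList.map Cell.ch] : List (List Cell)).length : Int) = 1 := by simp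
  rw [h1] at hfold
  have h2 : ((([d0.toList.map Cell.ch] ++
        (mergeRow ((List.range w).map (fun j => if j = k then (1:Int) else 0)) d1.toList
          ++ (d1.toList.drop w).map Cell.ch) ::
        (drest.map String.toList).map (fun r => r.map Cell.ch)).length : Int) - 1)
      = 1 + (((drest.map String.toList).length : Nat) : Int) := by
    simp
    omega
  rw [h2, hfold, PySem.List.pyGet?_neg_one, List.getLast?_concat, Option.getD_some]
  rw [List.filterMap_append, filterMap_map_ch, List.append_nil]
  refine sum_filterMap_mergeRow _ _ ?_ (foldl_gather_nonneg w _ _ (f0_nonneg w k))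
  rw [foldl_gather_length w _ _ (by simp)]
  exact getLastD_prop (fun l : List Char => w ≤ l.length) (drest.map String.toList)
    d1.toList hw1
    (by intro x hx; obtain ⟨s, hs, rfl⟩ := List.mem_map.mp hx; exact hlens s hs)

-- ===== VERDICT (by name: the statement is the Claim_ definition above) =====
theorem part2_spec : Claim_equal_part2 := by
  intro data _ hpre
  unfold Spec_part2
  obtain ⟨hlen2, hS, h2case, h3case⟩ := hpre
  cases data with
  | nil => simp at hlen2
  | cons d0 rest =>
    cases rest with
    | nil => simp at hlen2
    | cons d1 drest =>
      simp only [List.headD_cons] at hS h2case h3case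
      obtain ⟨k, hk⟩ : ∃ k, PySem.List.index? d0.toList 'S' = some k :=
        Option.isSome_iff_exists.mp ((PySem.List.index?_isSome_iff d0.toList 'S').mpr hS)
      obtain ⟨hkw, -⟩ := PySem.List.getElem_of_index?_eq_some hk
      cases drest with
      | nil =>
        have hk1 : k < d1.toList.length := by
          have h := h2case (by simp)
          rw [hk] at h
          simpa using h
        rw [part2_two d0 d1 k hk hk1, part2_alt_two d0 d1 k hk hkw]
      | cons d2 dr2 =>
        obtain ⟨hlens, hoks⟩ := h3case (by simp)
        rw [part2_eval d0 d1 (d2 :: dr2) k d0.toList.length hk rfl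
          (hlens d1 (by simp)) hkw
          (fun s hs => hlens s (by simp at hs ⊢; tauto))
          (fun s hs => hoks s (by simpa using hs))]
        rw [part2_alt_eval d0 d1 (d2 :: dr2) k hk]
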